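-- pv_equiv track=rewrite | github.com/boostcampDinosaur/coding-test-study | Junhwan/숫자게임.py | solution
-- ===== SOURCE A (Python) =====
-- from collections import deque
--
-- def solution(A, B):
--     answer = 0
--     A.sort(reverse=True)
--     B.sort(reverse=True)
--
--     A = deque(A)
--     B = deque(B)
--
--     while A:
--         a = A.popleft()
--         b = B.popleft()
--         if b > a:
--             answer += 1
--         else:
--             if B:
--                 # 질꺼면 최대한 크게 지자
--                 B.pop()
--                 B.appendleft(b)
--             else:
--                 return answer
--     return answer
-- ===== SOURCE B (Python) =====
-- def solution(A, B):
--     A.sort()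
--     B.sort()
--     i = 0
--     for b in B:
--         if i < len(A) and b > A[i]:
--             i += 1
--     return i
-- ===== Notes on version B (the rewrite author's own statement) =====
-- stated objective: simpler
-- what changed: Replaces the descending deque greedy with its popleft/sacrifice-pop/appendleft steps and early return by a plain ascending two-pointer sweep: sort both lists ascending, scan B once, advancing a single index into A on each win.
-- outside the precondition, e.g. on solution([1, 9], [5]): A returns 0, B returns 1; on solution([1, 2], [5]): A raises IndexError, B returns 1
import Mathlib
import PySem

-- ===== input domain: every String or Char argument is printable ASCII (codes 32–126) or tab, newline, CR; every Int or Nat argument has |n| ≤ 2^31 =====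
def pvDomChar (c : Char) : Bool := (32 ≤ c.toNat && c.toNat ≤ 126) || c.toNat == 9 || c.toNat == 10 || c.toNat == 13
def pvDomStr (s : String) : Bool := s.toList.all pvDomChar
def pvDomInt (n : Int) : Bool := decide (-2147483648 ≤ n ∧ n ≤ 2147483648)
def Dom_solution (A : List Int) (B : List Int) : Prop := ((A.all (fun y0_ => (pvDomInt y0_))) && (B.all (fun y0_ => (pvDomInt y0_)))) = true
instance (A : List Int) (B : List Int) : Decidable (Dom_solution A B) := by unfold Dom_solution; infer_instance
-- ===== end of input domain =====

-- B replaces A's descending deque greedy (popleft / sacrifice-pop / appendleft) by a plain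
-- ascending two-pointer sweep; equivalence is about the RETURN value only — both sort their
-- arguments in place (A descending, B ascending).

-- ===== PORT A =====
-- the while loop: A/B are the deques, ans the answer accumulator.
-- In the 'cons, []' case Python raises IndexError (B.popleft() on an empty deque);
-- that is unreachable under Pre_solution, the port returns ans there.
def solLoopA : List Int → List Int → Int → Int
  | [], _, ans => ans
  | _ :: _, [], ans => ans
  | a :: A', b :: B', ans =>
    if b > a then solLoopA A' B' (ans + 1)
    else if B' ≠ [] then solLoopA A' (b :: B'.dropLast) ans   -- B.pop(); B.appendleft(b)
    else ans                                                   -- return answer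

def solution (A : List Int) (B : List Int) : Int :=
  let As := PySem.List.sorted A (fun x => x) true
  let Bs := PySem.List.sorted B (fun x => x) true
  solLoopA As Bs 0

-- ===== PORT B =====
-- for b in B: if i < len(A) and b > A[i]: i += 1    (i stays in [0, len A], so the
-- '.getD 0' default behind the guarded A[i] lookup is never used)
def altLoop (As : List Int) : List Int → Int → Int
  | [], i => i
  | b :: rest, i =>
      altLoop As rest
        (if i < (As.length : Int) ∧ (PySem.List.pyGet? As i).getD 0 < b then i + 1 else i)

def solution_alt (A : List Int) (B : List Int) : Int :=
  let As := PySem.List.sorted A (fun x => x) false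
  let Bs := PySem.List.sorted B (fun x => x) false
  altLoop As Bs 0

-- ===== PRECONDITION & SPEC =====
-- Pre_ excludes inputs where B has fewer elements than A (outside the game's equal-length
-- domain): there A raises IndexError whenever the deque empties right after a win, and where
-- it does return, its early-exit count and B's full count are both defensible readings.
def Pre_solution (A : List Int) (B : List Int) : Prop := A.length ≤ B.length
instance (A : List Int) (B : List Int) : Decidable (Pre_solution A B) := by unfold Pre_solution; infer_instance
def pvWitness_solution : List Int × List Int := ([2, 1], [1, 3])

def Spec_solution (A : List Int) (B : List Int) (out : Int) : Prop := out = solution_alt A B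
instance (A : List Int) (B : List Int) (out : Int) : Decidable (Spec_solution A B out) := by unfold Spec_solution; infer_instance

-- ===== CLAIM (what is proved, stated in full; the proofs are below) =====
def Claim_equal_solution : Prop := ∀ (A : List Int) (B : List Int), Dom_solution A B → Pre_solution A B → Spec_solution A B (solution A B)

-- ===== LEMMAS AND PROOFS =====

-- ascending structural two-pointer (proof-side view of B's loop)
def alt : List Int → List Int → Int
  | [], _ => 0
  | _ :: _, [] => 0
  | a :: A', b :: B' => if a < b then 1 + alt A' B' else alt (a :: A') B'
  termination_by A B => B.length

-- descending structural two-pointer (proof-side view of A's loop)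
def dsc : List Int → List Int → Int
  | [], _ => 0
  | _ :: A', [] => dsc A' []
  | a :: A', b :: B' => if a < b then 1 + dsc A' B' else dsc A' (b :: B')

theorem alt_nil_right (A : List Int) : alt A [] = 0 := by
  cases A <;> simp [alt]

-- B's indexed fold computes the structural two-pointer
theorem altLoop_eq (Bs : List Int) : ∀ (As : List Int) (k : Nat), k ≤ As.length →
    altLoop As Bs (k : Int) = (k : Int) + alt (As.drop k) Bs := by
  induction Bs with
  | nil => intro As k hk; simp [altLoop, alt_nil_right]
  | cons b rest ih =>
    intro As k hk
    by_cases hlt : k < As.length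
    · have hget : PySem.List.pyGet? As (k : Int) = some As[k] := by
        rw [PySem.List.pyGet?_natCast]; exact List.getElem?_eq_getElem hlt
      have hdrop : As.drop k = As[k] :: As.drop (k + 1) := (List.getElem_cons_drop hlt).symm
      by_cases hwin : As[k] < b
      · have hcond : ((k : Int) < (As.length : Int) ∧ (PySem.List.pyGet? As (k : Int)).getD 0 < b) := by
          refine ⟨by exact_mod_cast hlt, ?_⟩
          rw [hget]; simpa using hwin
      -- win: both sides advance
        have hcast : ((k : Int) + 1) = ((k + 1 : Nat) : Int) := by push_cast; ring
        rw [altLoop, if_pos hcond, hcast, ih As (k + 1) hlt]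
        rw [hdrop, alt, if_pos hwin]
        push_cast; ring
      · have hcond : ¬ ((k : Int) < (As.length : Int) ∧ (PySem.List.pyGet? As (k : Int)).getD 0 < b) := by
          rintro ⟨-, h2⟩
          rw [hget] at h2; simp at h2; exact hwin h2
        rw [altLoop, if_neg hcond, ih As k hk, hdrop, alt, if_neg hwin, ← hdrop]
    · -- k = As.length: pointer exhausted, everything is a loss
      have hk' : k = As.length := le_antisymm hk (Nat.not_lt.mp hlt)
      have hcond : ¬ ((k : Int) < (As.length : Int) ∧ (PySem.List.pyGet? As (k : Int)).getD 0 < b) := by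
        rintro ⟨h1, -⟩; exact hlt (by exact_mod_cast h1)
      rw [altLoop, if_neg hcond, ih As k hk]
      have : As.drop k = [] := by simp [hk']
      simp [this, alt]

-- a singleton A is beaten exactly once as soon as one b beats it
theorem alt_singleton_hit (B : List Int) : ∀ (a : Int), (∃ b ∈ B, a < b) → alt [a] B = 1 := by
  induction B with
  | nil => rintro a ⟨b, hb, -⟩; cases hb
  | cons b B' ih =>
    intro a h
    by_cases hwin : a < b
    · simp [alt, hwin, alt_nil_right]
    · rw [alt, if_neg hwin]
      rcases h with ⟨w, hw, haw⟩
      rcases List.mem_cons.mp hw with rfl | hw'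
      · exact absurd haw hwin
      · exact ih a ⟨w, hw', haw⟩

-- dropping an unbeatable maximum of A does not change the count
theorem alt_dropLast_left (B : List Int) : ∀ (A : List Int),
    (∀ b ∈ B, ∀ l, A.getLast? = some l → b ≤ l) → alt A B = alt A.dropLast B := by
  induction B with
  | nil => intro A _; rw [alt_nil_right, alt_nil_right]
  | cons b B' ih =>
    intro A hle
    match A with
    | [] => rfl
    | [a] =>
      have hba : b ≤ a := hle b (List.mem_cons_self ..) a rfl
      rw [alt, if_neg (not_lt.mpr hba)]
      have : alt [a] B' = alt [] B' := by
        exact ih [a] (fun b' hb' l hl => hle b' (List.mem_cons_of_mem _ hb') l hl)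
      simpa [alt] using this
    | a :: a2 :: A' =>
      have hlast : (a :: a2 :: A').getLast? = (a2 :: A').getLast? := by
        simp [List.getLast?_cons_cons]
      have hle' : ∀ b' ∈ B', ∀ l, (a2 :: A').getLast? = some l → b' ≤ l := by
        intro b' hb' l hl
        exact hle b' (List.mem_cons_of_mem _ hb') l (by rw [hlast]; exact hl)
      by_cases hwin : a < b
      · rw [alt, if_pos hwin]
        have := ih (a2 :: A') hle'
        rw [this]
        have hdl : (a :: a2 :: A').dropLast = a :: (a2 :: A').dropLast := by
          simp [List.dropLast_cons_of_ne_nil]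
        rw [hdl, alt, if_pos hwin]
      · rw [alt, if_neg hwin]
        have := ih (a :: a2 :: A') (fun b' hb' l hl => hle b' (List.mem_cons_of_mem _ hb') l hl)
        rw [this]
        have hdl : (a :: a2 :: A').dropLast = a :: (a2 :: A').dropLast := by
          simp [List.dropLast_cons_of_ne_nil]
        rw [hdl, alt, if_neg hwin, ← hdl]

-- head ≤ last in an ascending list
theorem pairwise_head_le_last (a : Int) (A' : List Int) (la : Int)
    (h : (a :: A').Pairwise (· ≤ ·)) (hla : (a :: A').getLast? = some la) : a ≤ la := by
  cases A' with
  | nil => simp at hla; omega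
  | cons a2 A'' =>
    rw [List.getLast?_cons_cons] at hla
    exact (List.pairwise_cons.mp h).1 la (List.mem_of_getLast? hla)

-- when the maximum of B beats the maximum of A, one match uses exactly those two
theorem alt_top_win (B : List Int) : ∀ (A : List Int),
    A.Pairwise (· ≤ ·) → B.Pairwise (· ≤ ·) →
    ∀ la lb, A.getLast? = some la → B.getLast? = some lb → la < lb →
    alt A B = 1 + alt A.dropLast B.dropLast := by
  induction B with
  | nil => intro A _ _ la lb _ hlb _; cases hlb
  | cons b B' ih =>
    intro A hA hB la lb hla hlb hwin
    match A with
    | [] => cases hla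
    | a :: A' =>
      by_cases hw1 : a < b
      · cases A' with
        | nil => simp [alt, hw1]
        | cons a2 A'' =>
          cases B' with
          | nil => simp [alt, hw1, alt_nil_right]
          | cons b2 B'' =>
            have hla' : (a2 :: A'').getLast? = some la := by
              rw [List.getLast?_cons_cons] at hla; exact hla
            have hlb' : (b2 :: B'').getLast? = some lb := by
              rw [List.getLast?_cons_cons] at hlb; exact hlb
            have ih' := ih (a2 :: A'') (List.Pairwise.tail hA) (List.Pairwise.tail hB) la lb hla' hlb' hwin
            rw [alt, if_pos hw1, ih',
              show (a :: a2 :: A'').dropLast = a :: (a2 :: A'').dropLast from by simp,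
              show (b :: b2 :: B'').dropLast = b :: (b2 :: B'').dropLast from by simp,
              alt, if_pos hw1]
      · -- loss at the bottom: b ≤ a, so B' cannot be empty (else lb = b ≤ a ≤ la < lb)
        cases B' with
        | nil =>
          exfalso
          have : lb = b := by simp at hlb; omega
          have hba : b ≤ a := not_lt.mp hw1
          have := pairwise_head_le_last a A' la hA hla
          omega
        | cons b2 B'' =>
          have hlb' : (b2 :: B'').getLast? = some lb := by
            rw [List.getLast?_cons_cons] at hlb; exact hlb
          cases A' with
          | nil =>
            have hla' : la = a := by simp at hla; omega
            have hmem : lb ∈ b2 :: B'' := List.mem_of_getLast? hlb'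
            rw [alt, if_neg hw1, alt_singleton_hit _ a ⟨lb, hmem, by omega⟩]
            simp [alt]
          | cons a2 A'' =>
            have ih' := ih (a :: a2 :: A'') hA (List.Pairwise.tail hB) la lb hla hlb' hwin
            rw [alt, if_neg hw1, ih',
              show (b :: b2 :: B'').dropLast = b :: (b2 :: B'').dropLast from by simp,
              show (a :: a2 :: A'').dropLast = a :: (a2 :: A'').dropLast from by simp,
              alt, if_neg hw1]

theorem dsc_nil_right : ∀ (A : List Int), dsc A [] = 0 := by
  intro A; induction A with
  | nil => rfl
  | cons a A' ih => rw [dsc, ih]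

-- descending two-pointer equals ascending two-pointer on the reversed lists
theorem dsc_eq_alt_rev : ∀ (Ad Bd : List Int),
    Ad.Pairwise (fun x y => y ≤ x) → Bd.Pairwise (fun x y => y ≤ x) →
    dsc Ad Bd = alt Ad.reverse Bd.reverse := by
  intro Ad
  induction Ad with
  | nil => intro Bd _ _; simp [dsc, alt]
  | cons a Ad' ih =>
    intro Bd hA hB
    cases Bd with
    | nil => rw [dsc_nil_right]; rw [show (List.reverse ([] : List Int)) = [] from rfl, alt_nil_right]
    | cons b Bd' =>
      have hArev : (a :: Ad').reverse = Ad'.reverse ++ [a] := List.reverse_cons ..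
      have hAsc : (a :: Ad').reverse.Pairwise (· ≤ ·) := List.pairwise_reverse.mpr hA
      have hBsc : (b :: Bd').reverse.Pairwise (· ≤ ·) := List.pairwise_reverse.mpr hB
      have hAlast : (a :: Ad').reverse.getLast? = some a := by
        rw [hArev]; exact List.getLast?_concat
      by_cases hwin : a < b
      · have hBlast : (b :: Bd').reverse.getLast? = some b := by
          rw [List.reverse_cons]; exact List.getLast?_concat
        have := alt_top_win (b :: Bd').reverse (a :: Ad').reverse hAsc hBsc a b hAlast hBlast hwin
        rw [dsc, if_pos hwin, ih Bd' (List.Pairwise.tail hA) (List.Pairwise.tail hB), this,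
          hArev, List.reverse_cons, List.dropLast_concat, List.dropLast_concat]
      · -- b ≤ a: every element of B is ≤ a, the unbeatable maximum of A can be dropped
        have hle : ∀ x ∈ (b :: Bd').reverse, ∀ l, (a :: Ad').reverse.getLast? = some l → x ≤ l := by
          intro x hx l hl
          have hl' : l = a := by rw [hAlast] at hl; exact (Option.some.inj hl).symm
          have hx' : x ∈ b :: Bd' := List.mem_reverse.mp hx
          have hxb : x ≤ b := by
            rcases List.mem_cons.mp hx' with rfl | hx''
            · omega
            · exact (List.pairwise_cons.mp hB).1 x hx''
          omega
        have := alt_dropLast_left (b :: Bd').reverse (a :: Ad').reverse hle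
        rw [dsc, if_neg hwin, ih (b :: Bd') (List.Pairwise.tail hA) hB, this,
          hArev, List.dropLast_concat]

-- A's deque loop equals the descending two-pointer (take-prefix invariant: the sacrifice step
-- 'B.pop(); B.appendleft(b)' only trims the live prefix of B)
theorem solLoopA_eq : ∀ (A B : List Int) (k : Nat) (ans : Int),
    A.length ≤ k → k ≤ B.length → solLoopA A (B.take k) ans = ans + dsc A B := by
  intro A
  induction A with
  | nil => intro B k ans _ _; rw [show solLoopA [] (B.take k) ans = ans from rfl, dsc]; ring
  | cons a A' ih =>
    intro B k ans hak hkb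
    cases B with
    | nil => simp at hak hkb; omega
    | cons b B' =>
      cases k with
      | zero => simp at hak
      | succ k' =>
        rw [List.take_succ_cons]
        by_cases hwin : a < b
        · rw [show solLoopA (a :: A') (b :: B'.take k') ans
                = solLoopA A' (B'.take k') (ans + 1) from by rw [solLoopA, if_pos hwin]]
          rw [ih B' k' (ans + 1) (by simpa using hak) (by simpa using hkb),
            dsc, if_pos hwin]
          ring
        · by_cases hne : B'.take k' = []
          · -- deque exhausted: Python returns ans; here A' is forced empty so dsc adds nothing
            have hk'0 : k' = 0 := by
              rcases List.take_eq_nil_iff.mp hne with h | h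
              · exact h
              · subst h; simp at hkb; omega
            have hA' : A' = [] := by
              have : A'.length = 0 := by simp at hak; omega
              exact List.eq_nil_of_length_eq_zero this
            subst hA'
            rw [show solLoopA [a] (b :: B'.take k') ans = ans from by
                rw [solLoopA, if_neg hwin, if_neg (not_not_intro hne)],
              dsc, if_neg hwin, dsc]
            ring
          · have hk'pos : 1 ≤ k' := by
              rcases Nat.eq_zero_or_pos k' with h | h
              · subst h; simp at hne
              · omega
            have hkB' : k' ≤ B'.length := by simpa using hkb
            have hdl : (B'.take k').dropLast = B'.take (k' - 1) := by
              rw [List.dropLast_eq_take, List.length_take, List.take_take]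
              congr 1
              omega
            rw [show solLoopA (a :: A') (b :: B'.take k') ans
                = solLoopA A' (b :: (B'.take k').dropLast) ans from by
                  rw [solLoopA, if_neg hwin, if_pos hne]]
            rw [hdl, show b :: B'.take (k' - 1) = (b :: B').take k' from by
                cases k' with
                | zero => omega
                | succ n => simp]
            rw [ih (b :: B') k' ans (by simp at hak; omega) (by simp; omega),
              dsc, if_neg hwin]

-- sorted descending is the reverse of sorted ascending (values determine the list)
theorem sorted_rev_eq_reverse (xs : List Int) :
    PySem.List.sorted xs (fun x => x) true = (PySem.List.sorted xs (fun x => x) false).reverse := by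
  apply List.eq_of_perm_of_sorted (le := fun x y => y ≤ x)
  · intro a b _ _ h1 h2; omega
  · exact PySem.List.sorted_pairwise_rev xs (fun x => x)
  · exact List.pairwise_reverse.mpr (PySem.List.sorted_pairwise xs (fun x => x))
  · exact ((PySem.List.sorted_perm xs (fun x => x) true).trans
      ((PySem.List.sorted_perm xs (fun x => x) false).symm)).trans
      (List.reverse_perm _).symm

-- ===== VERDICT (by name: the statement is the Claim_ definition above) =====
theorem solution_spec : Claim_equal_solution := by
  intro A B _ hpre
  unfold Spec_solution solution solution_alt
  simp only []
  have hlenA : (PySem.List.sorted A (fun x => x) true).length = A.length :=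
    PySem.List.length_sorted ..
  have hlenB : (PySem.List.sorted B (fun x => x) true).length = B.length :=
    PySem.List.length_sorted ..
  have h1 : solLoopA (PySem.List.sorted A (fun x => x) true) (PySem.List.sorted B (fun x => x) true) 0
      = 0 + dsc (PySem.List.sorted A (fun x => x) true) (PySem.List.sorted B (fun x => x) true) := by
    have h := solLoopA_eq (PySem.List.sorted A (fun x => x) true)
      (PySem.List.sorted B (fun x => x) true)
      (PySem.List.sorted B (fun x => x) true).length 0
      (by rw [hlenA, hlenB]; exact hpre) le_rfl
    rwa [List.take_length] at h
  have h2 := dsc_eq_alt_rev (PySem.List.sorted A (fun x => x) true)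
    (PySem.List.sorted B (fun x => x) true)
    (PySem.List.sorted_pairwise_rev A (fun x => x))
    (PySem.List.sorted_pairwise_rev B (fun x => x))
  have h3 : (PySem.List.sorted A (fun x => x) true).reverse = PySem.List.sorted A (fun x => x) false := by
    rw [sorted_rev_eq_reverse, List.reverse_reverse]
  have h4 : (PySem.List.sorted B (fun x => x) true).reverse = PySem.List.sorted B (fun x => x) false := by
    rw [sorted_rev_eq_reverse, List.reverse_reverse]
  have h5 : altLoop (PySem.List.sorted A (fun x => x) false) (PySem.List.sorted B (fun x => x) false) 0
      = 0 + alt (PySem.List.sorted A (fun x => x) false) (PySem.List.sorted B (fun x => x) false) := by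
    have := altLoop_eq (PySem.List.sorted B (fun x => x) false)
      (PySem.List.sorted A (fun x => x) false) 0 (Nat.zero_le _)
    simpa using this
  rw [h1, h2, h3, h4, h5]
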